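-- pv_equiv track=rewrite | github.com/lengthwisehems/retail2 | dl1961_inventory.py | determine_stretch
-- ===== SOURCE A (Python) =====
-- from typing import Any, Dict, Iterable, List, Optional, Tuple
--
-- def determine_stretch(
--     fabric_description: Optional[str], tags: Iterable[str], description: str
-- ) -> str:
--     candidates = []
--     if fabric_description:
--         candidates.append(fabric_description.lower())
--     candidates.extend(tag.lower() for tag in tags)
--     candidates.append(description.lower())
--     if any("high stretch" in text for text in candidates):
--         return "High Stretch"
--     if any("low stretch" in text for text in candidates):
--         return "Low Stretch"
--     if any("rigid" in text for text in candidates):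
--         return "Rigid"
--     return ""
-- ===== SOURCE B (Python) =====
-- def determine_stretch(fabric_description, tags, description):
--     # Numeric-rank formulation: each string maps to a stretch rank (3/2/1/0),
--     # the answer is the table entry of the maximum rank over all sources.
--     levels = ["", "Rigid", "Low Stretch", "High Stretch"]
--
--     def rank(s):
--         t = s.lower()
--         if "high stretch" in t:
--             return 3
--         if "low stretch" in t:
--             return 2
--         if "rigid" in t:
--             return 1
--         return 0
--
--     best = rank(description)
--     for tag in tags:
--         best = max(best, rank(tag))
--     if fabric_description:
--         best = max(best, rank(fabric_description))
--     return levels[best]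
-- ===== Notes on version B (the rewrite author's own statement) =====
-- stated objective: alternative
-- what changed: B replaces A's three staged any()-substring scans and early-return chain with an arithmetical formulation: each source string is mapped once to a numeric rank (3/2/1/0), a running max over the sources (traversed in the opposite order: description, tags, fabric) picks the strongest level, and the result is read from a fixed lookup table.
import Mathlib
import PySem

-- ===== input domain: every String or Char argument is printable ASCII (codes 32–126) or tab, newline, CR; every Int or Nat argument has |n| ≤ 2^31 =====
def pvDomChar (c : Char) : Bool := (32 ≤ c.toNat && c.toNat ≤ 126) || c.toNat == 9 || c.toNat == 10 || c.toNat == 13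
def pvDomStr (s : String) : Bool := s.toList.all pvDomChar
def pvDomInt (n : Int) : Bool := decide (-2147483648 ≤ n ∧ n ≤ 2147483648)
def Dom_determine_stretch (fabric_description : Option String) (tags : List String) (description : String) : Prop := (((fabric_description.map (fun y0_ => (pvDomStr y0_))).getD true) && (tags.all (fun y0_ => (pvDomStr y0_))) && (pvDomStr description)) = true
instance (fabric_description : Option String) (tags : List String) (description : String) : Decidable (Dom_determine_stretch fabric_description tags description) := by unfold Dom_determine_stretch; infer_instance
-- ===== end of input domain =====

-- B trades A's staged any()-scans/early-return chain for an arithmetical formulation: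
-- each source string gets a numeric rank, a running max picks the strongest, a table names it.

-- ===== PORT A =====
def determine_stretch (fabric_description : Option String) (tags : List String) (description : String) : String :=
  -- candidates = []; if fabric_description: candidates.append(fabric_description.lower())
  let candidates : List String :=
    match fabric_description with
    | some s => if s ≠ "" then [PySem.Str.lower s] else []
    | none => []
  -- candidates.extend(tag.lower() for tag in tags); candidates.append(description.lower())
  let candidates := candidates ++ tags.map PySem.Str.lower ++ [PySem.Str.lower description]
  if candidates.any (fun t => PySem.Str.isIn "high stretch" t) then "High Stretch"
  else if candidates.any (fun t => PySem.Str.isIn "low stretch" t) then "Low Stretch"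
  else if candidates.any (fun t => PySem.Str.isIn "rigid" t) then "Rigid"
  else ""

-- ===== PORT B =====
-- B's rank(s): the numeric stretch level of one string
def stretchRank (s : String) : Nat :=
  let t := PySem.Str.lower s
  if PySem.Str.isIn "high stretch" t then 3
  else if PySem.Str.isIn "low stretch" t then 2
  else if PySem.Str.isIn "rigid" t then 1
  else 0

def determine_stretch_alt (fabric_description : Option String) (tags : List String) (description : String) : String :=
  let levels : List String := ["", "Rigid", "Low Stretch", "High Stretch"]
  let best := stretchRank description
  let best := tags.foldl (fun m s => max m (stretchRank s)) best
  let best :=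
    match fabric_description with
    | some s => if s ≠ "" then max best (stretchRank s) else best
    | none => best
  levels.getD best ""

-- ===== PRECONDITION & SPEC =====
def Spec_determine_stretch (fabric_description : Option String) (tags : List String) (description : String) (out : String) : Prop := out = determine_stretch_alt fabric_description tags description
instance (fabric_description : Option String) (tags : List String) (description : String) (out : String) : Decidable (Spec_determine_stretch fabric_description tags description out) := by unfold Spec_determine_stretch; infer_instance

-- ===== CLAIM (what is proved, stated in full; the proofs are below) =====
def Claim_equal_determine_stretch : Prop := ∀ (fabric_description : Option String) (tags : List String) (description : String), Dom_determine_stretch fabric_description tags description → Spec_determine_stretch fabric_description tags description (determine_stretch fabric_description tags description)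

-- ===== LEMMAS AND PROOFS =====

-- the rank encoded by three priority flags
def pickIdx (h l r : Bool) : Nat := if h then 3 else if l then 2 else if r then 1 else 0

theorem stretchRank_eq (s : String) :
    stretchRank s = pickIdx (PySem.Str.isIn "high stretch" (PySem.Str.lower s))
      (PySem.Str.isIn "low stretch" (PySem.Str.lower s))
      (PySem.Str.isIn "rigid" (PySem.Str.lower s)) := rfl

theorem max_pickIdx (h₁ l₁ r₁ h₂ l₂ r₂ : Bool) :
    max (pickIdx h₁ l₁ r₁) (pickIdx h₂ l₂ r₂) = pickIdx (h₁ || h₂) (l₁ || l₂) (r₁ || r₂) := by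
  cases h₁ <;> cases l₁ <;> cases r₁ <;> cases h₂ <;> cases l₂ <;> cases r₂ <;> decide

theorem foldl_max_rank (l : List String) (m : Nat) :
    l.foldl (fun m s => max m (stretchRank s)) m
      = max m (pickIdx (l.any fun s => PySem.Str.isIn "high stretch" (PySem.Str.lower s))
          (l.any fun s => PySem.Str.isIn "low stretch" (PySem.Str.lower s))
          (l.any fun s => PySem.Str.isIn "rigid" (PySem.Str.lower s))) := by
  induction l generalizing m with
  | nil => simp [pickIdx]
  | cons x xs ih =>
    rw [List.foldl_cons, ih, stretchRank_eq]
    rw [max_assoc, max_pickIdx]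
    simp [List.any_cons]

-- the early-return chain equals the table lookup at the flag-encoded rank
theorem ifs_eq_getD (ah al ar bh bl br : Bool) (hH : ah = bh) (hL : al = bl) (hR : ar = br) :
    (if ah then "High Stretch" else if al then "Low Stretch" else if ar then "Rigid" else "")
      = (["", "Rigid", "Low Stretch", "High Stretch"] : List String).getD (pickIdx bh bl br) "" := by
  subst hH hL hR
  cases ah <;> cases al <;> cases ar <;> rfl

-- ===== VERDICT (by name: the statement is the Claim_ definition above) =====
theorem determine_stretch_spec : Claim_equal_determine_stretch := by
  intro fd tags desc _
  unfold Spec_determine_stretch determine_stretch determine_stretch_alt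
  cases fd with
  | none =>
    dsimp only
    rw [foldl_max_rank]
    simp only [stretchRank_eq, max_pickIdx, List.any_append, List.any_map,
      List.any_cons, List.any_nil, Bool.or_false, Bool.false_or, List.nil_append]
    apply ifs_eq_getD <;>
      simp [Function.comp_def, Bool.or_comm, Bool.or_left_comm, Bool.or_assoc]
  | some s =>
    by_cases hs : s = ""
    · dsimp only
      simp only [hs, ne_eq, not_true_eq_false, Bool.false_eq_true, if_false, List.nil_append]
      rw [foldl_max_rank]
      simp only [stretchRank_eq, max_pickIdx, List.any_append, List.any_map,
        List.any_cons, List.any_nil, Bool.or_false, Bool.false_or]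
      apply ifs_eq_getD <;>
        simp [Function.comp_def, Bool.or_comm, Bool.or_left_comm, Bool.or_assoc]
    · dsimp only
      simp only [hs, ne_eq, not_false_eq_true, if_true, List.cons_append, List.nil_append]
      rw [foldl_max_rank]
      simp only [stretchRank_eq, max_pickIdx, List.any_append, List.any_map,
        List.any_cons, List.any_nil, Bool.or_false, Bool.false_or]
      apply ifs_eq_getD <;>
        simp [Function.comp_def, Bool.or_comm, Bool.or_left_comm, Bool.or_assoc]
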